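-- pv_equiv track=rewrite | github.com/benquick123/code-profiling | code/batch-1/vse-naloge-brez-testov/DN7-M-159.py | preberi_pot
-- ===== SOURCE A (Python) =====
-- def preberi_pot(ukazi):
--     """
--     Za podani seznam ukazov (glej navodila naloge) vrni pot.
--
--     Args:
--         ukazi (str): ukazi, napisani po vrsticah
--
--     Returns:
--         list of tuple of int: pot
--     """
--     x, y = (0, 0) # trenutna pozicija
--     pot = [(0, 0)]
--     current_pointer = 1
--     komande = ukazi.splitlines()
--     for ukaz in komande:
--         if ukaz.isnumeric():
--             if   current_pointer == 0:
--                 x += int(ukaz)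
--                 pot.append((x, y))
--             elif current_pointer == 1:
--                 y -= int(ukaz)
--                 pot.append((x, y))
--             elif current_pointer == 2:
--                 x -= int(ukaz)
--                 pot.append((x, y))
--             elif current_pointer == 3:
--                 y += int(ukaz)
--                 pot.append((x, y))
--         elif ukaz == "DESNO":
--             if   current_pointer == 0:
--                 current_pointer = 3
--             elif current_pointer == 1:
--                 current_pointer = 0
--             elif current_pointer == 2:
--                 current_pointer = 1
--             elif current_pointer == 3:
--                 current_pointer = 2
--         elif ukaz == "LEVO":
--             if   current_pointer == 0:
--                 current_pointer = 1
--             elif current_pointer == 1: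
--                 current_pointer = 2
--             elif current_pointer == 2:
--                 current_pointer = 3
--             elif current_pointer == 3:
--                 current_pointer = 0
--     return pot
-- ===== SOURCE B (Python) =====
-- def preberi_pot(ukazi):
--     lines = ukazi.splitlines()
--     # stage 1: heading before each line, as running sum of turn values (LEVO +1, DESNO -1)
--     turn = {"LEVO": 1, "DESNO": -1}
--     headings = [1]
--     for line in lines:
--         headings.append(headings[-1] + turn.get(line, 0))
--     # stage 2: the list of moves (distance, heading mod 4) for the numeric lines
--     moves = [(int(line), h % 4) for line, h in zip(lines, headings) if line.isnumeric()]
--     # stage 3: prefix-sum the displacement vectors into the path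
--     vec = [(1, 0), (0, -1), (-1, 0), (0, 1)]
--     pot = [(0, 0)]
--     for n, h in moves:
--         dx, dy = vec[h]
--         x, y = pot[-1]
--         pot.append((x + n * dx, y + n * dy))
--     return pot
-- ===== Notes on version B (the rewrite author's own statement) =====
-- stated objective: alternative
-- what changed: B is staged: it first prefix-sums the turn values into a headings list, then builds the list of (distance, heading) moves by zipping lines with headings, and finally prefix-sums the displacement vectors into the path, instead of A's single stateful pass with three four-way if/elif cascades.
import Mathlib
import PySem

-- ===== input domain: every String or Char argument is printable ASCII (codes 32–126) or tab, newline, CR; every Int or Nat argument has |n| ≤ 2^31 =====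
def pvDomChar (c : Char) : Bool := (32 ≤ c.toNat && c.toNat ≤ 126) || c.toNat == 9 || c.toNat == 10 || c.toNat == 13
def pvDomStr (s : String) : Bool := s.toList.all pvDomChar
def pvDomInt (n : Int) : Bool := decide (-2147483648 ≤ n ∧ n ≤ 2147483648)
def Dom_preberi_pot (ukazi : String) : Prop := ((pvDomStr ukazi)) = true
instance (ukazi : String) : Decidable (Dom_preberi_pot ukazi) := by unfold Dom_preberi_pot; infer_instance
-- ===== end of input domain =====

-- B re-derives the path in three staged passes (turn prefix sums -> move list -> coordinate
-- prefix sums) instead of A's single stateful pass with three four-way if/elif cascades.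

-- ===== PORT A =====
-- A's loop state: ((x, y), pot, current_pointer)
def pvStepA (st : (Int × Int) × List (Int × Int) × Int) (ukaz : String) :
    (Int × Int) × List (Int × Int) × Int :=
  let x := st.1.1; let y := st.1.2; let pot := st.2.1; let cp := st.2.2
  -- ukaz.isnumeric(): on the printable-ASCII domain isnumeric coincides with isdigit (exact there)
  if PySem.Str.strIsdigit ukaz then
    let n := (PySem.Int.ofStr? ukaz).getD 0  -- int(ukaz); the isnumeric guard guarantees success
    if cp = 0 then ((x + n, y), pot ++ [(x + n, y)], cp)
    else if cp = 1 then ((x, y - n), pot ++ [(x, y - n)], cp)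
    else if cp = 2 then ((x - n, y), pot ++ [(x - n, y)], cp)
    else if cp = 3 then ((x, y + n), pot ++ [(x, y + n)], cp)
    else ((x, y), pot, cp)
  else if ukaz = "DESNO" then
    if cp = 0 then ((x, y), pot, 3)
    else if cp = 1 then ((x, y), pot, 0)
    else if cp = 2 then ((x, y), pot, 1)
    else if cp = 3 then ((x, y), pot, 2)
    else ((x, y), pot, cp)
  else if ukaz = "LEVO" then
    if cp = 0 then ((x, y), pot, 1)
    else if cp = 1 then ((x, y), pot, 2)
    else if cp = 2 then ((x, y), pot, 3)
    else if cp = 3 then ((x, y), pot, 0)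
    else ((x, y), pot, cp)
  else ((x, y), pot, cp)

def preberi_pot (ukazi : String) : List (Int × Int) :=
  ((PySem.Str.splitlines ukazi).foldl pvStepA ((0, 0), [(0, 0)], 1)).2.1

-- ===== PORT B =====
-- turn = {"LEVO": 1, "DESNO": -1}
def pvTurnDict : PySem.Dict String Int := PySem.Dict.ofList [("LEVO", 1), ("DESNO", -1)]

-- vec = [(1,0), (0,-1), (-1,0), (0,1)]
def pvVec : List (Int × Int) := [(1, 0), (0, -1), (-1, 0), (0, 1)]

def preberi_pot_alt (ukazi : String) : List (Int × Int) :=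
  let lines := PySem.Str.splitlines ukazi
  -- stage 1: headings[i] = heading before line i, running sum of turn.get(line, 0)
  let headings := lines.foldl
    (fun hs line => hs ++ [PySem.List.pyGetD hs (-1) 0 + PySem.Dict.getD pvTurnDict line 0])
    [(1 : Int)]
  -- stage 2: moves = [(int(line), h % 4) for line, h in zip(lines, headings) if line.isnumeric()]
  -- (isnumeric coincides with isdigit on the printable-ASCII domain)
  let moves := (lines.zip headings).filterMap
    (fun p => if PySem.Str.strIsdigit p.1 then
        some ((PySem.Int.ofStr? p.1).getD 0, PySem.Int.mod p.2 4)
      else none)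
  -- stage 3: prefix-sum the displacement vectors into the path
  moves.foldl
    (fun pot m =>
      let d := PySem.List.pyGetD pvVec m.2 ((0 : Int), (0 : Int))
      let p := PySem.List.pyGetD pot (-1) ((0 : Int), (0 : Int))
      pot ++ [(p.1 + m.1 * d.1, p.2 + m.1 * d.2)])
    [((0 : Int), (0 : Int))]

-- ===== PRECONDITION & SPEC =====
def Spec_preberi_pot (ukazi : String) (out : List (Int × Int)) : Prop := out = preberi_pot_alt ukazi
instance (ukazi : String) (out : List (Int × Int)) : Decidable (Spec_preberi_pot ukazi out) := by unfold Spec_preberi_pot; infer_instance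

-- ===== CLAIM (what is proved, stated in full; the proofs are below) =====
def Claim_equal_preberi_pot : Prop := ∀ (ukazi : String), Dom_preberi_pot ukazi → Spec_preberi_pot ukazi (preberi_pot ukazi)

-- ===== LEMMAS AND PROOFS =====

-- turn.get(line, 0)
def pvTurn (l : String) : Int := PySem.Dict.getD pvTurnDict l 0

-- the common spine: the appended points, given position (x, y) and running heading h
def pvRef : List String → Int → Int → Int → List (Int × Int)
  | [], _, _, _ => []
  | l :: ls, x, y, h =>
    if PySem.Str.strIsdigit l then
      let n := (PySem.Int.ofStr? l).getD 0
      let d := PySem.List.pyGetD pvVec (PySem.Int.mod h 4) ((0 : Int), (0 : Int))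
      (x + n * d.1, y + n * d.2) :: pvRef ls (x + n * d.1) (y + n * d.2) (h + pvTurn l)
    else pvRef ls x y (h + pvTurn l)

theorem pvTurnDict_eq : pvTurnDict = PySem.Dict.mk [("LEVO", 1), ("DESNO", -1)] := by decide

theorem pvTurn_other (l : String) (h1 : l ≠ "LEVO") (h2 : l ≠ "DESNO") : pvTurn l = 0 := by
  simp [pvTurn, pvTurnDict_eq, PySem.Dict.getD, PySem.Dict.get?, Ne.symm h1, Ne.symm h2]

theorem pvTurn_of_digit (l : String) (hd : PySem.Str.strIsdigit l = true) : pvTurn l = 0 :=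
  pvTurn_other l (by rintro rfl; exact absurd hd (by decide))
    (by rintro rfl; exact absurd hd (by decide))

theorem pvTurn_levo : pvTurn "LEVO" = 1 := by decide
theorem pvTurn_desno : pvTurn "DESNO" = -1 := by decide

-- A's fold produces pot ++ pvRef, with pointer cp = h % 4
theorem pvA_ref (ls : List String) (x y : Int) (pot : List (Int × Int)) (h cp : Int)
    (hcp : cp = PySem.Int.mod h 4) :
    (ls.foldl pvStepA ((x, y), pot, cp)).2.1 = pot ++ pvRef ls x y h := by
  induction ls generalizing x y pot h cp with
  | nil => simp [pvRef]
  | cons l ls ih =>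
      have e : PySem.Int.mod h 4 = h % 4 := PySem.Int.mod_eq_emod_of_pos (by norm_num)
      by_cases hd : PySem.Str.strIsdigit l = true
      · have ht := pvTurn_of_digit l hd
        have h4 : cp = 0 ∨ cp = 1 ∨ cp = 2 ∨ cp = 3 := by omega
        simp only [List.foldl_cons, pvStepA, hd, if_true, pvRef, ← hcp, ht, add_zero]
        rcases h4 with h0 | h0 | h0 | h0 <;> subst h0 <;>
          simp only [reduceIte] <;>
          norm_num [pvVec, PySem.List.pyGetD, PySem.List.pyIdx?] <;>
          rw [ih _ _ _ h _ hcp] <;> simp [List.append_assoc, sub_eq_add_neg]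
      · by_cases hl : l = "LEVO"
        · subst hl
          have e' : PySem.Int.mod (h + 1) 4 = (h + 1) % 4 :=
            PySem.Int.mod_eq_emod_of_pos (by norm_num)
          rw [e] at hcp
          have h4 : cp = 0 ∨ cp = 1 ∨ cp = 2 ∨ cp = 3 := by omega
          simp only [List.foldl_cons, pvStepA, hd, pvRef, pvTurn_levo]
          rcases h4 with h0 | h0 | h0 | h0 <;> subst h0 <;>
            norm_num <;> exact ih x y pot (h + 1) _ (by rw [e']; omega)
        · by_cases hr : l = "DESNO"
          · subst hr
            have e' : PySem.Int.mod (h + -1) 4 = (h + -1) % 4 :=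
              PySem.Int.mod_eq_emod_of_pos (by norm_num)
            rw [e] at hcp
            have h4 : cp = 0 ∨ cp = 1 ∨ cp = 2 ∨ cp = 3 := by omega
            simp only [List.foldl_cons, pvStepA, hd, pvRef, pvTurn_desno]
            rcases h4 with h0 | h0 | h0 | h0 <;> subst h0 <;>
              norm_num <;> exact ih x y pot (h + -1) _ (by rw [e']; omega)
          · simp only [List.foldl_cons, pvStepA, hd, if_false, hl, hr, pvRef,
              pvTurn_other l hl hr, add_zero]
            exact ih x y pot h cp hcp

-- B stage 1: the headings fold appends the running turn sums
def pvHeads : List String → Int → List Int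
  | [], _ => []
  | l :: ls, h => (h + pvTurn l) :: pvHeads ls (h + pvTurn l)

theorem pvHeads_fold (ls : List String) (hs : List Int) (h : Int)
    (hlast : PySem.List.pyGetD hs (-1) 0 = h) :
    ls.foldl (fun hs line => hs ++ [PySem.List.pyGetD hs (-1) 0 + PySem.Dict.getD pvTurnDict line 0]) hs
      = hs ++ pvHeads ls h := by
  induction ls generalizing hs h with
  | nil => simp [pvHeads]
  | cons l ls ih =>
      simp only [List.foldl_cons, hlast, pvHeads]
      rw [ih (hs ++ [h + PySem.Dict.getD pvTurnDict l 0]) (h + pvTurn l)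
        (by simp [PySem.List.pyGetD_neg_one_append_singleton, pvTurn])]
      simp [pvTurn]

-- B stage 2: zipping with the headings list and filtering gives pvMoves
def pvMoves : List String → Int → List (Int × Int)
  | [], _ => []
  | l :: ls, h =>
    if PySem.Str.strIsdigit l then
      ((PySem.Int.ofStr? l).getD 0, PySem.Int.mod h 4) :: pvMoves ls (h + pvTurn l)
    else pvMoves ls (h + pvTurn l)

theorem pvMoves_zip (ls : List String) (h : Int) :
    (ls.zip (h :: pvHeads ls h)).filterMap
      (fun p => if PySem.Str.strIsdigit p.1 then
          some ((PySem.Int.ofStr? p.1).getD 0, PySem.Int.mod p.2 4)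
        else none)
      = pvMoves ls h := by
  induction ls generalizing h with
  | nil => simp [pvMoves]
  | cons l ls ih =>
      simp only [pvHeads, List.zip_cons_cons, List.filterMap_cons, pvMoves]
      by_cases hd : PySem.Str.strIsdigit l = true
      · simp only [hd, ite_true, ih]
      · simp only [hd, ite_false, Bool.false_eq_true, ih]

-- B stage 3: the path fold appends pvAcc
def pvAcc : List (Int × Int) → Int → Int → List (Int × Int)
  | [], _, _ => []
  | m :: ms, x, y =>
    let d := PySem.List.pyGetD pvVec m.2 ((0 : Int), (0 : Int))
    (x + m.1 * d.1, y + m.1 * d.2) :: pvAcc ms (x + m.1 * d.1) (y + m.1 * d.2)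

theorem pvAcc_fold (ms : List (Int × Int)) (pot : List (Int × Int)) (x y : Int)
    (hlast : PySem.List.pyGetD pot (-1) ((0 : Int), (0 : Int)) = (x, y)) :
    ms.foldl
      (fun pot m =>
        let d := PySem.List.pyGetD pvVec m.2 ((0 : Int), (0 : Int))
        let p := PySem.List.pyGetD pot (-1) ((0 : Int), (0 : Int))
        pot ++ [(p.1 + m.1 * d.1, p.2 + m.1 * d.2)]) pot
      = pot ++ pvAcc ms x y := by
  induction ms generalizing pot x y with
  | nil => simp [pvAcc]
  | cons m ms ih =>
      simp only [List.foldl_cons, hlast, pvAcc]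
      rw [ih (pot ++ [(x + m.1 * (PySem.List.pyGetD pvVec m.2 (0, 0)).1,
            y + m.1 * (PySem.List.pyGetD pvVec m.2 (0, 0)).2)])
          (x + m.1 * (PySem.List.pyGetD pvVec m.2 (0, 0)).1)
          (y + m.1 * (PySem.List.pyGetD pvVec m.2 (0, 0)).2)
          (by simp [PySem.List.pyGetD_neg_one_append_singleton])]
      simp [List.append_assoc]

-- the two spines agree
theorem pvAcc_moves (ls : List String) (x y h : Int) :
    pvAcc (pvMoves ls h) x y = pvRef ls x y h := by
  induction ls generalizing x y h with
  | nil => rfl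
  | cons l ls ih =>
      simp only [pvMoves, pvRef]
      by_cases hd : PySem.Str.strIsdigit l = true
      · simp only [hd, ite_true, pvAcc, ih]
      · simp only [hd, ite_false, Bool.false_eq_true, ih]

-- ===== VERDICT (by name: the statement is the Claim_ definition above) =====
theorem preberi_pot_spec : Claim_equal_preberi_pot := by
  intro ukazi _
  unfold Spec_preberi_pot
  show preberi_pot ukazi = preberi_pot_alt ukazi
  unfold preberi_pot preberi_pot_alt
  simp only []
  rw [pvA_ref (PySem.Str.splitlines ukazi) 0 0 [(0, 0)] 1 1 (by decide)]
  rw [pvHeads_fold (PySem.Str.splitlines ukazi) [1] 1 (by decide)]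
  simp only [List.singleton_append]
  rw [pvMoves_zip]
  rw [pvAcc_fold _ _ 0 0 (by decide)]
  rw [pvAcc_moves]
  rfl
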